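-- pv_equiv track=rewrite | github.com/Anshum016/Data-Structures-and-Algorithms | Searching and Sorting/8Tripletswithsum.py | contribute
-- ===== SOURCE A (Python) =====
-- def contribute(arr,sum):
--
--     ans = 0
--     n = len(arr)
--     for i in range(0,n-2):
--         for j in range(i+1,n-1):
--             for k in range(j+1,n):
--                 if(arr[i] + arr[j] + arr[k] < sum):
--                     ans +=1
--
--     return ans
-- ===== SOURCE B (Python) =====
-- def contribute(arr, sum):
--     a = sorted(arr)
--     n = len(a)
--     ans = 0
--     for i in range(n - 2):
--         l, r = i + 1, n - 1
--         while l < r: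
--             if a[i] + a[l] + a[r] < sum:
--                 ans += r - l
--                 l += 1
--             else:
--                 r -= 1
--     return ans
-- ===== Notes on version B (the rewrite author's own statement) =====
-- stated objective: faster
-- what changed: Replaced the O(n^3) triple nested index loop by sort-then-two-pointer: for each first element a two-pointer sweep counts all valid pairs in one pass, which is correct because the count of triples below the target depends only on the multiset of elements.
import Mathlib
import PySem

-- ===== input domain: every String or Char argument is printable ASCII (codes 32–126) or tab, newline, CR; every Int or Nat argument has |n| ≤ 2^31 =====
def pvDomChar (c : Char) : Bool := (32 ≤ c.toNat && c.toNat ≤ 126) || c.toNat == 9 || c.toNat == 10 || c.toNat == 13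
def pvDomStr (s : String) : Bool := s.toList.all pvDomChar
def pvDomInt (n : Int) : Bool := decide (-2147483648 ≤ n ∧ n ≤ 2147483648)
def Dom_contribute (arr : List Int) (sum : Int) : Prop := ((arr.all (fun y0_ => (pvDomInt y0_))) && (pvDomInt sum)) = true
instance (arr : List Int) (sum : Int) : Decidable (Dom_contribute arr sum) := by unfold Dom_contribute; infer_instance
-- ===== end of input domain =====

-- B replaces A's O(n^3) triple index loop by sort + per-first-element two-pointer pair counting (measured faster, asymptotic).


-- ===== PORT A =====
def contribute (arr : List Int) (sum : Int) : Int :=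
  let n : Int := PySem.List.len arr
  (PySem.List.pyRange 0 (n - 2) 1).foldl (fun ans i =>
    (PySem.List.pyRange (i + 1) (n - 1) 1).foldl (fun ans j =>
      (PySem.List.pyRange (j + 1) n 1).foldl (fun ans k =>
        if PySem.List.pyGetD arr i 0 + PySem.List.pyGetD arr j 0 + PySem.List.pyGetD arr k 0 < sum
        then ans + 1 else ans) ans) ans) 0

-- ===== PORT B =====
-- the Python 'while l < r' loop, recursion on the gap r - l
def pvWhile (a : List Int) (sum i : Int) (ans l r : Int) : Int :=
  if _h : l < r then
    if PySem.List.pyGetD a i 0 + PySem.List.pyGetD a l 0 + PySem.List.pyGetD a r 0 < sum then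
      pvWhile a sum i (ans + (r - l)) (l + 1) r
    else
      pvWhile a sum i ans l (r - 1)
  else ans
termination_by (r - l).toNat
decreasing_by all_goals omega

def contribute_alt (arr : List Int) (sum : Int) : Int :=
  let a := PySem.List.sorted arr (fun x => x) false
  let n : Int := PySem.List.len a
  (PySem.List.pyRange 0 (n - 2) 1).foldl (fun ans i => pvWhile a sum i ans (i + 1) (n - 1)) 0

-- ===== PRECONDITION & SPEC =====
def Spec_contribute (arr : List Int) (sum : Int) (out : Int) : Prop := out = contribute_alt arr sum
instance (arr : List Int) (sum : Int) (out : Int) : Decidable (Spec_contribute arr sum out) := by unfold Spec_contribute; infer_instance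

-- ===== CLAIM (what is proved, stated in full; the proofs are below) =====
def Claim_equal_contribute : Prop := ∀ (arr : List Int) (sum : Int), Dom_contribute arr sum → Spec_contribute arr sum (contribute arr sum)

-- ===== LEMMAS AND PROOFS =====

-- number of z in l with z < t
def cnt1 (t : Int) (l : List Int) : Int := (l.countP (fun z => decide (z < t)) : Int)

-- generic layer: sum over positions p of f (t - l[p]) (suffix after p)
def layer (f : Int → List Int → Int) : Int → List Int → Int
  | _, [] => 0
  | t, x :: xs => f (t - x) xs + layer f t xs

-- number of pairs p < q with l[p] + l[q] < t
def cnt2 : Int → List Int → Int := layer cnt1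
-- number of triples p < q < r with sum of elements < s
def cnt3 : Int → List Int → Int := layer cnt2

theorem cnt2_nil (t : Int) : cnt2 t [] = 0 := rfl
theorem cnt2_cons (t x : Int) (xs : List Int) : cnt2 t (x :: xs) = cnt1 (t - x) xs + cnt2 t xs := rfl
theorem cnt3_cons (s x : Int) (xs : List Int) : cnt3 s (x :: xs) = cnt2 (s - x) xs + cnt3 s xs := rfl

theorem cnt2_short (t : Int) {l : List Int} (h : l.length ≤ 1) : cnt2 t l = 0 := by
  match l, h with
  | [], _ => rfl
  | [x], _ => rfl

-- ---------- permutation invariance of cnt2 / cnt3 ----------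
theorem cnt1_perm (t : Int) {l l' : List Int} (h : l.Perm l') : cnt1 t l = cnt1 t l' := by
  simp [cnt1, h.countP_eq]

theorem cnt2_perm (t : Int) {l l' : List Int} (h : l.Perm l') : cnt2 t l = cnt2 t l' := by
  induction h generalizing t with
  | nil => rfl
  | cons x _ ih => simp [cnt2_cons, ih, cnt1_perm _ (by assumption)]
  | swap x y l =>
      simp only [cnt2_cons, cnt1, List.countP_cons]
      push_cast
      split_ifs <;> simp_all <;> omega
  | trans _ _ ih1 ih2 => exact (ih1 t).trans (ih2 t)

theorem cnt3_perm (s : Int) {l l' : List Int} (h : l.Perm l') : cnt3 s l = cnt3 s l' := by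
  induction h generalizing s with
  | nil => rfl
  | cons x _ ih => simp [cnt3_cons, ih, cnt2_perm _ (by assumption)]
  | swap x y l =>
      simp only [cnt3_cons, cnt2_cons]
      have e : s - x - y = s - y - x := by ring
      have e2 : cnt1 (s - x - y) l = cnt1 (s - y - x) l := by rw [e]
      rw [e2]; ring
  | trans _ _ ih1 ih2 => exact (ih1 s).trans (ih2 s)

-- ---------- sum characterisations ----------
theorem layer_sum (f : Int → List Int → Int) (t : Int) (u : List Int) :
    (((List.range u.length).map (fun m => f (t - u.getD m 0) (u.drop (m + 1)))).sum) = layer f t u := by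
  induction u generalizing t with
  | nil => rfl
  | cons x xs ih =>
      rw [show (x :: xs).length = xs.length + 1 from rfl, List.range_succ_eq_map]
      simp only [List.map_cons, List.map_map, List.sum_cons]
      have : ((List.range xs.length).map
          (Function.comp (fun m => f (t - (x :: xs).getD m 0) ((x :: xs).drop (m + 1))) Nat.succ)) =
          (List.range xs.length).map (fun m => f (t - xs.getD m 0) (xs.drop (m + 1))) := by
        apply List.map_congr_left; intro m _; simp [Function.comp]
      rw [this, ih]
      simp [layer]

-- drop the trailing zero terms of a range sum
theorem sum_range_drop_zeros (g : Nat → Int) (q n : Nat) (hq : q ≤ n)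
    (hz : ∀ k, q ≤ k → k < n → g k = 0) :
    ((List.range n).map g).sum = ((List.range q).map g).sum := by
  induction n with
  | zero => interval_cases q; rfl
  | succ n ih =>
      rcases Nat.eq_or_lt_of_le hq with h | h
      · rw [h]
      · rw [List.range_succ]
        simp only [List.map_append, List.sum_append]
        simp [hz n (by omega) (by omega)]
        exact ih (by omega) (fun k hk1 hk2 => hz k hk1 (by omega))

-- outer layer: sum over i in range (n-2) of cnt2 on the suffix = cnt3
theorem outer_sum (a : List Int) (s : Int) :
    ((List.range (((a.length : Int) - 2).toNat)).map
      (fun i => cnt2 (s - a.getD i 0) (a.drop (i + 1)))).sum = cnt3 s a := by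
  rw [show cnt3 s a = layer cnt2 s a from rfl, ← layer_sum cnt2 s a]
  exact (sum_range_drop_zeros _ _ _ (by omega) (fun k hk1 hk2 => by
    apply cnt2_short
    simp only [List.length_drop]
    omega)).symm

-- ---------- A: triple loop = cnt3 ----------
theorem inner_eq (arr : List Int) (s c : Int) (j : Int) (hj : 0 ≤ j) (acc : Int) :
    (PySem.List.pyRange (j + 1) ((arr.length : Int)) 1).foldl
      (fun ans k => if c + PySem.List.pyGetD arr k 0 < s then ans + 1 else ans) acc
    = acc + cnt1 (s - c) (arr.drop (j + 1).toNat) := by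
  rw [PySem.List.foldl_pyRange_pyGetD' arr 0
    (fun ans z => if c + z < s then ans + 1 else ans) acc (a := j + 1) (by omega)]
  rw [PySem.List.foldl_ite_add_one (fun z => c + z < s)]
  congr 1
  simp only [cnt1]
  congr 1
  apply List.countP_congr
  intro z _
  constructor <;> intro h <;> [skip; skip] <;> simp_all <;> omega

theorem mid_sum (arr : List Int) (t : Int) (i : Nat) (hi : (i : Int) < (arr.length : Int) - 2) :
    ((PySem.List.pyRange ((i : Int) + 1) ((arr.length : Int) - 1) 1).map
      (fun j => cnt1 (t - PySem.List.pyGetD arr j 0) (arr.drop (j + 1).toNat))).sum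
    = cnt2 t (arr.drop (i + 1)) := by
  have hlen : i + 2 < arr.length := by omega
  set u := arr.drop (i + 1) with hu
  have hul : u.length = arr.length - (i + 1) := by simp [hu]
  rw [PySem.List.pyRange_one, List.map_map]
  have hcnt : (((arr.length : Int) - 1) - ((i : Int) + 1)).toNat = u.length - 1 := by omega
  rw [hcnt]
  have hfun : ((fun j => cnt1 (t - PySem.List.pyGetD arr j 0) (arr.drop (j + 1).toNat)) ∘
      (fun k : Nat => (i : Int) + 1 + (k : Int))) = (fun k : Nat => cnt1 (t - u.getD k 0) (u.drop (k + 1))) := by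
    funext k
    simp only [Function.comp]
    have h1 : (i : Int) + 1 + (k : Int) = ((i + 1 + k : Nat) : Int) := by push_cast; ring
    rw [h1, PySem.List.pyGetD_natCast]
    have h2 : (((i + 1 + k : Nat) : Int) + 1).toNat = i + 1 + k + 1 := by omega
    rw [h2]
    have h3 : arr.getD (i + 1 + k) 0 = u.getD k 0 := by
      simp [hu, List.getD_eq_getElem?_getD, List.getElem?_drop]
    have h4 : arr.drop (i + 1 + k + 1) = u.drop (k + 1) := by
      simp [hu, List.drop_drop]; ring_nf
    rw [h3, h4]
  rw [hfun]
  rw [show cnt2 t u = layer cnt1 t u from rfl, ← layer_sum cnt1 t u]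
  apply (sum_range_drop_zeros _ _ _ (by omega) ?_).symm
  intro k hk1 hk2
  have : u.drop (k + 1) = [] := List.drop_eq_nil_of_le (by omega)
  rw [this]
  rfl

theorem middle_eq (arr : List Int) (s : Int) (i : Nat) (hi : (i : Int) < (arr.length : Int) - 2) (acc : Int) :
    (PySem.List.pyRange ((i : Int) + 1) ((arr.length : Int) - 1) 1).foldl
      (fun ans j => (PySem.List.pyRange (j + 1) ((arr.length : Int)) 1).foldl
        (fun ans k => if PySem.List.pyGetD arr (i : Int) 0 + PySem.List.pyGetD arr j 0 +
            PySem.List.pyGetD arr k 0 < s then ans + 1 else ans) ans) acc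
    = acc + cnt2 (s - PySem.List.pyGetD arr (i : Int) 0) (arr.drop (i + 1)) := by
  have hbody : ∀ j ∈ PySem.List.pyRange ((i : Int) + 1) ((arr.length : Int) - 1), ∀ acc' : Int,
      (PySem.List.pyRange (j + 1) ((arr.length : Int)) 1).foldl
        (fun ans k => if PySem.List.pyGetD arr (i : Int) 0 + PySem.List.pyGetD arr j 0 +
            PySem.List.pyGetD arr k 0 < s then ans + 1 else ans) acc'
      = acc' + cnt1 (s - PySem.List.pyGetD arr (i : Int) 0 - PySem.List.pyGetD arr j 0)
          (arr.drop (j + 1).toNat) := by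
    intro j hj acc'
    rw [inner_eq arr s (PySem.List.pyGetD arr (i : Int) 0 + PySem.List.pyGetD arr j 0) j
      (by rcases (PySem.List.mem_pyRange_one).mp hj with ⟨h1, _⟩; omega) acc']
    congr 2
    ring
  rw [PySem.List.foldl_congr_mem' _ _ _ _ hbody, PySem.List.foldl_add]
  congr 1
  rw [← mid_sum arr (s - PySem.List.pyGetD arr (i : Int) 0) i hi]

theorem contribute_eq_cnt3 (arr : List Int) (s : Int) : contribute arr s = cnt3 s arr := by
  simp only [contribute, PySem.List.len_eq]
  have hbody : ∀ i ∈ PySem.List.pyRange 0 ((arr.length : Int) - 2), ∀ acc' : Int,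
      (PySem.List.pyRange (i + 1) ((arr.length : Int) - 1) 1).foldl
        (fun ans j => (PySem.List.pyRange (j + 1) ((arr.length : Int)) 1).foldl
          (fun ans k => if PySem.List.pyGetD arr i 0 + PySem.List.pyGetD arr j 0 +
              PySem.List.pyGetD arr k 0 < s then ans + 1 else ans) ans) acc'
      = acc' + cnt2 (s - PySem.List.pyGetD arr i 0) (arr.drop (i + 1).toNat) := by
    intro i hi acc'
    rcases (PySem.List.mem_pyRange_one).mp hi with ⟨h1, h2⟩
    have hk : i = ((i.toNat : Nat) : Int) := by omega
    rw [hk]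
    rw [middle_eq arr s i.toNat (by omega) acc']
    have h3 : (((i.toNat : Nat) : Int) + 1).toNat = i.toNat + 1 := by omega
    rw [h3]
  rw [PySem.List.foldl_congr_mem' _ _ _ _ hbody, PySem.List.foldl_add, PySem.List.pyRange_one]
  simp only [List.map_map, zero_add, sub_zero]
  rw [← outer_sum arr s]
  congr 1
  apply List.map_congr_left
  intro k _
  simp only [Function.comp]
  have h2 : ((k : Int) + 1).toNat = k + 1 := by omega
  rw [h2, PySem.List.pyGetD_natCast]

-- ---------- B: two-pointer = cnt2 on the segment ----------
-- the contiguous segment a[l..r]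
def seg (a : List Int) (l r : Nat) : List Int := (a.drop l).take (r + 1 - l)

theorem length_seg (a : List Int) (l r : Nat) (_hlr : l ≤ r) (hr : r < a.length) :
    (seg a l r).length = r + 1 - l := by
  simp [seg]
  omega

theorem seg_cons (a : List Int) (l r : Nat) (hlr : l ≤ r) (hl : l < a.length) :
    seg a l r = a[l] :: seg a (l + 1) r := by
  simp only [seg]
  rw [List.drop_eq_getElem_cons hl]
  have h1 : r + 1 - l = (r - l) + 1 := by omega
  have h2 : r + 1 - (l + 1) = r - l := by omega
  rw [h1, h2, List.take_succ_cons]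

theorem seg_snoc (a : List Int) (l r : Nat) (hlr : l < r) (hr : r < a.length) :
    seg a l r = seg a l (r - 1) ++ [a[r]] := by
  simp only [seg]
  have h1 : r + 1 - l = (r - l) + 1 := by omega
  have h2 : r - 1 + 1 - l = r - l := by omega
  rw [h1, h2, List.take_add_one]
  congr 1
  have h3 : r - l < (a.drop l).length := by simp; omega
  rw [List.getElem?_eq_getElem h3]
  simp [List.getElem_drop]
  congr 1
  omega

theorem mem_seg (a : List Int) (l r : Nat) {z : Int} (hz : z ∈ seg a l r) :
    ∃ m, l ≤ m ∧ m ≤ r ∧ ∃ _hm : m < a.length, z = a[m] := by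
  rcases List.mem_iff_getElem.mp hz with ⟨p, hp, hpe⟩
  have hplen : p < r + 1 - l ∧ p < a.length - l := by
    have := hp
    simp only [seg, List.length_take, List.length_drop] at this
    omega
  refine ⟨l + p, by omega, by omega, by omega, ?_⟩
  rw [← hpe]
  simp only [seg]
  rw [List.getElem_take, List.getElem_drop]

-- pairwise monotone access
theorem sorted_getElem_le (a : List Int) (hs : a.Pairwise (· ≤ ·)) (p q : Nat)
    (hpq : p ≤ q) (hq : q < a.length) : a[p]'(by omega) ≤ a[q] := by
  rcases Nat.eq_or_lt_of_le hpq with h | h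
  · subst h; exact le_refl _
  · exact List.pairwise_iff_getElem.mp hs p q (by omega) hq h

theorem cnt1_eq_length (t : Int) (L : List Int) (h : ∀ z ∈ L, z < t) :
    cnt1 t L = (L.length : Int) := by
  simp only [cnt1]
  congr 1
  apply List.countP_eq_length.mpr
  intro z hz
  simpa using h z hz

theorem cnt2_snoc (t z : Int) (ys : List Int) :
    cnt2 t (ys ++ [z]) = cnt2 t ys + (ys.countP (fun y => decide (z < t - y)) : Int) := by
  induction ys with
  | nil => simp [cnt2_cons, cnt2_nil, cnt1]
  | cons y ys ih =>
      simp only [List.cons_append, cnt2_cons, ih, cnt1, List.countP_append, List.countP_cons]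
      push_cast
      split_ifs <;> simp_all <;> omega

theorem pvWhile_eq (a : List Int) (s i : Int) (hs : a.Pairwise (· ≤ ·)) :
    ∀ (q : Nat) (ans l r : Int), (r - l).toNat = q → 0 ≤ l → l ≤ r → r < (a.length : Int) →
    pvWhile a s i ans l r = ans + cnt2 (s - PySem.List.pyGetD a i 0) (seg a l.toNat r.toNat) := by
  intro q
  induction q with
  | zero =>
      intro ans l r hq hl hlr hr
      have hlr' : l = r := by omega
      rw [pvWhile, dif_neg (by omega : ¬ l < r)]
      have : cnt2 (s - PySem.List.pyGetD a i 0) (seg a l.toNat r.toNat) = 0 := by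
        apply cnt2_short
        have : (seg a l.toNat r.toNat).length = r.toNat + 1 - l.toNat :=
          length_seg a _ _ (by omega) (by omega)
        omega
      omega
  | succ q ih =>
      intro ans l r hq hl hlr hr
      have hltr : l < r := by omega
      have hlN : l.toNat < a.length := by omega
      have hrN : r.toNat < a.length := by omega
      have hgl : PySem.List.pyGetD a l 0 = a[l.toNat] := PySem.List.pyGetD_eq_getElem a 0 hl (by omega)
      have hgr : PySem.List.pyGetD a r 0 = a[r.toNat] := PySem.List.pyGetD_eq_getElem a 0 (by omega) hr
      rw [pvWhile, dif_pos hltr]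
      -- reduce the dependent ite
      set t := s - PySem.List.pyGetD a i 0 with ht
      by_cases hc : PySem.List.pyGetD a i 0 + PySem.List.pyGetD a l 0 + PySem.List.pyGetD a r 0 < s
      · rw [if_pos hc]
        rw [ih (ans + (r - l)) (l + 1) r (by omega) (by omega) (by omega) hr]
        have hseg : seg a l.toNat r.toNat = a[l.toNat] :: seg a (l + 1).toNat r.toNat := by
          have h' : (l + 1).toNat = l.toNat + 1 := by omega
          rw [h']
          exact seg_cons a l.toNat r.toNat (by omega) hlN
        rw [hseg, cnt2_cons]
        have hall : ∀ z ∈ seg a (l + 1).toNat r.toNat, z < t - a[l.toNat] := by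
          intro z hz
          rcases mem_seg a _ _ hz with ⟨m, hm1, hm2, hm3, hze⟩
          have hle : z ≤ a[r.toNat] := by
            rw [hze]; exact sorted_getElem_le a hs m r.toNat (by omega) hrN
          have : a[l.toNat] + a[r.toNat] < t := by rw [ht, ← hgl, ← hgr]; omega
          omega
        rw [cnt1_eq_length _ _ hall]
        have hlen2 : ((seg a (l + 1).toNat r.toNat).length : Int) = r - l := by
          rw [length_seg a _ _ (by omega) hrN]
          omega
        rw [hlen2]
        omega
      · rw [if_neg hc]
        rw [ih ans l (r - 1) (by omega) hl (by omega) (by omega)]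
        have hseg : seg a l.toNat r.toNat = seg a l.toNat (r - 1).toNat ++ [a[r.toNat]] := by
          have h' : (r - 1).toNat = r.toNat - 1 := by omega
          rw [h']
          exact seg_snoc a l.toNat r.toNat (by omega) hrN
        rw [hseg, cnt2_snoc]
        have hzero : (seg a l.toNat (r - 1).toNat).countP (fun y => decide (a[r.toNat] < t - y)) = 0 := by
          apply List.countP_eq_zero.mpr
          intro y hy
          rcases mem_seg a _ _ hy with ⟨m, hm1, hm2, hm3, hye⟩
          have hge : a[l.toNat] ≤ y := by
            rw [hye]; exact sorted_getElem_le a hs l.toNat m hm1 hm3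
          have : ¬ (a[l.toNat] + a[r.toNat] < t) := by rw [ht, ← hgl, ← hgr]; omega
          simp only [decide_eq_true_eq]
          omega
        rw [hzero]
        omega

-- ---------- B: whole program = cnt3 of the sorted list ----------
theorem alt_eq (arr : List Int) (s : Int) :
    contribute_alt arr s = cnt3 s (PySem.List.sorted arr (fun x => x) false) := by
  simp only [contribute_alt, PySem.List.len_eq]
  set a := PySem.List.sorted arr (fun x => x) false with ha
  have hs : a.Pairwise (· ≤ ·) := by
    have := PySem.List.sorted_pairwise arr (fun x => x)
    simpa [ha] using this
  have hbody : ∀ i ∈ PySem.List.pyRange 0 ((a.length : Int) - 2), ∀ acc' : Int,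
      pvWhile a s i acc' (i + 1) ((a.length : Int) - 1)
      = acc' + cnt2 (s - PySem.List.pyGetD a i 0) (a.drop (i + 1).toNat) := by
    intro i hi acc'
    rcases (PySem.List.mem_pyRange_one).mp hi with ⟨h1, h2⟩
    rw [pvWhile_eq a s i hs ((((a.length : Int) - 1) - (i + 1)).toNat) acc' (i + 1)
      ((a.length : Int) - 1) rfl (by omega) (by omega) (by omega)]
    congr 1
    simp only [seg]
    rw [List.take_of_length_le]
    simp only [List.length_drop]
    omega
  rw [PySem.List.foldl_congr_mem' _ _ _ _ hbody, PySem.List.foldl_add, PySem.List.pyRange_one]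
  simp only [List.map_map, zero_add, sub_zero]
  rw [← outer_sum a s]
  congr 1
  apply List.map_congr_left
  intro k _
  simp only [Function.comp]
  have h2 : ((k : Int) + 1).toNat = k + 1 := by omega
  rw [h2, PySem.List.pyGetD_natCast]

-- ===== VERDICT (by name: the statement is the Claim_ definition above) =====
theorem contribute_spec : Claim_equal_contribute := by
  intro arr s _
  unfold Spec_contribute
  rw [contribute_eq_cnt3, alt_eq]
  exact (cnt3_perm s (PySem.List.sorted_perm arr (fun x => x) false)).symm
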